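-- pv_equiv track=rewrite | github.com/cpravetz/stage7 | services/capabilitiesmanager/src/plugins/INTERVIEW_COACH/main.py | _prioritize_improvements
-- ===== SOURCE A (Python) =====
-- from typing import Dict, Any, List, Tuple
--
-- def _prioritize_improvements(weak_areas: list) -> List[Dict[str, str]]:
--     """Prioritize improvement areas."""
--     if not weak_areas:
--         weak_areas = ["Overall structure", "Impact quantification", "Delivery clarity"]
--
--     priority_map = {
--         "structure": 1,
--         "content": 2,
--         "impact": 1,
--         "delivery": 3,
--         "reflection": 2
--     }
--
--     prioritized = []
--     for area in weak_areas[:5]: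
--         area_lower = area.lower()
--         priority = min([priority_map.get(key, 3) for key in priority_map if key in area_lower] or [3])
--         prioritized.append({
--             "area": area,
--             "priority": f"P{priority}",
--             "focus": f"Improve {area.lower()}"
--         })
--
--     return sorted(prioritized, key=lambda x: x["priority"])
-- ===== SOURCE B (Python) =====
-- def _prioritize_improvements(weak_areas: list):
--     """Prioritize improvement areas (bucketed by priority instead of sorted)."""
--     if not weak_areas:
--         weak_areas = ["Overall structure", "Impact quantification", "Delivery clarity"]
--
--     priority_map = {
--         "structure": 1,
--         "content": 2,
--         "impact": 1,
--         "delivery": 3,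
--         "reflection": 2
--     }
--
--     b1, b2, b3 = [], [], []
--     for area in weak_areas[:5]:
--         low = area.lower()
--         p = min((v for k, v in priority_map.items() if k in low), default=3)
--         rec = {"area": area, "priority": f"P{p}", "focus": f"Improve {low}"}
--         if p == 1:
--             b1.append(rec)
--         elif p == 2:
--             b2.append(rec)
--         else:
--             b3.append(rec)
--     return b1 + b2 + b3
-- ===== Notes on version B (the rewrite author's own statement) =====
-- stated objective: alternative
-- what changed: Replaces the final comparison sort over the 'priority' string with a single bucketing pass into three lists (P1/P2/P3) concatenated at the end, matching the stable sort's order by construction.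
import Mathlib
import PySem

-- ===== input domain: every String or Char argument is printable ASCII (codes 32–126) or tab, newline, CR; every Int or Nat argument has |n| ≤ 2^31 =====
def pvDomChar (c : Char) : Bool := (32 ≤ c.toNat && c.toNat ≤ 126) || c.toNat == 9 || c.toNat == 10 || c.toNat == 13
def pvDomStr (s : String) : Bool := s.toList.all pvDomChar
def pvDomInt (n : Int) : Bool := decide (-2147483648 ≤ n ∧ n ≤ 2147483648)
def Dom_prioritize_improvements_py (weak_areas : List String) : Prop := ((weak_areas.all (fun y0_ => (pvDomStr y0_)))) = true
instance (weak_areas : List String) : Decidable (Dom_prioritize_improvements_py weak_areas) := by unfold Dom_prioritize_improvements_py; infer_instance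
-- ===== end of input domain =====

-- B replaces the final stable sort on the "priority" string with one bucketing pass
-- into three lists (P1/P2/P3) concatenated at the end (objective: alternative).

-- ===== PORT A =====
def pvDefaults : List String :=
  ["Overall structure", "Impact quantification", "Delivery clarity"]

def pvPmap : List (String × Int) :=
  [("structure", 1), ("content", 2), ("impact", 1), ("delivery", 3), ("reflection", 2)]

-- the per-area record A builds (area, "P<priority>", focus)
def pvRecordA (area : String) : List (String × String) :=
  let low := PySem.Str.lower area
  let cands := ((pvPmap.map (·.1)).filter (fun k => PySem.Str.isIn k low)).map
      (fun k => (List.lookup k pvPmap).getD 3)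
  let cands' := if cands = [] then [3] else cands
  let p := (PySem.List.min? cands' (fun x : Int => x)).getD 3
  [("area", area), ("priority", "P" ++ PySem.Int.toStr p), ("focus", "Improve " ++ low)]

def prioritize_improvements_py (weak_areas : List String) : List (List (String × String)) :=
  let was := if weak_areas = [] then pvDefaults else weak_areas
  let prioritized := (PySem.List.slice was none (some 5)).foldl (fun acc a => acc ++ [pvRecordA a]) []
  PySem.List.sorted prioritized (fun d => (List.lookup "priority" d).getD "")

-- ===== PORT B =====
-- priority as B computes it: min over matching map values, default 3
def pvPrioB (area : String) : Int :=
  let low := PySem.Str.lower area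
  let vs := (pvPmap.filter (fun kv => PySem.Str.isIn kv.1 low)).map (·.2)
  (PySem.List.min? vs (fun x : Int => x)).getD 3

def pvStepB (st : List (List (String × String)) × List (List (String × String)) × List (List (String × String)))
    (area : String) :
    List (List (String × String)) × List (List (String × String)) × List (List (String × String)) :=
  let low := PySem.Str.lower area
  let p := pvPrioB area
  let r := [("area", area), ("priority", "P" ++ PySem.Int.toStr p), ("focus", "Improve " ++ low)]
  if p = 1 then (st.1 ++ [r], st.2.1, st.2.2)
  else if p = 2 then (st.1, st.2.1 ++ [r], st.2.2)
  else (st.1, st.2.1, st.2.2 ++ [r])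

def prioritize_improvements_py_alt (weak_areas : List String) : List (List (String × String)) :=
  let was := if weak_areas = [] then pvDefaults else weak_areas
  let bs := (PySem.List.slice was none (some 5)).foldl pvStepB ([], [], [])
  bs.1 ++ bs.2.1 ++ bs.2.2

-- ===== PRECONDITION & SPEC =====
def Spec_prioritize_improvements_py (weak_areas : List String) (out : List (List (String × String))) : Prop := out = prioritize_improvements_py_alt weak_areas
instance (weak_areas : List String) (out : List (List (String × String))) : Decidable (Spec_prioritize_improvements_py weak_areas out) := by unfold Spec_prioritize_improvements_py; infer_instance

-- ===== CLAIM (what is proved, stated in full; the proofs are below) =====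
def Claim_equal_prioritize_improvements_py : Prop := ∀ (weak_areas : List String), Dom_prioritize_improvements_py weak_areas → Spec_prioritize_improvements_py weak_areas (prioritize_improvements_py weak_areas)

-- ===== LEMMAS AND PROOFS =====

-- A's priority value, extracted for the proofs
def pvPrioA (area : String) : Int :=
  let low := PySem.Str.lower area
  let cands := ((pvPmap.map (·.1)).filter (fun k => PySem.Str.isIn k low)).map
      (fun k => (List.lookup k pvPmap).getD 3)
  let cands' := if cands = [] then [3] else cands
  (PySem.List.min? cands' (fun x : Int => x)).getD 3

-- both priority computations agree, and the value is 1, 2 or 3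
lemma pvPrio_eq (area : String) : pvPrioB area = pvPrioA area := by
  unfold pvPrioA pvPrioB pvPmap
  cases h1 : PySem.Str.isIn "structure" (PySem.Str.lower area) <;>
  cases h2 : PySem.Str.isIn "content" (PySem.Str.lower area) <;>
  cases h3 : PySem.Str.isIn "impact" (PySem.Str.lower area) <;>
  cases h4 : PySem.Str.isIn "delivery" (PySem.Str.lower area) <;>
  cases h5 : PySem.Str.isIn "reflection" (PySem.Str.lower area) <;>
  simp at h1 h2 h3 h4 h5 <;>
  simp [h1, h2, h3, h4, h5, List.filter, List.lookup, PySem.List.min?]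

lemma pvPrio_cases (area : String) : pvPrioA area = 1 ∨ pvPrioA area = 2 ∨ pvPrioA area = 3 := by
  unfold pvPrioA pvPmap
  cases h1 : PySem.Str.isIn "structure" (PySem.Str.lower area) <;>
  cases h2 : PySem.Str.isIn "content" (PySem.Str.lower area) <;>
  cases h3 : PySem.Str.isIn "impact" (PySem.Str.lower area) <;>
  cases h4 : PySem.Str.isIn "delivery" (PySem.Str.lower area) <;>
  cases h5 : PySem.Str.isIn "reflection" (PySem.Str.lower area) <;>
  simp at h1 h2 h3 h4 h5 <;>
  simp [h1, h2, h3, h4, h5, List.filter, List.lookup, PySem.List.min?]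

-- the sort key of A's record is "P" ++ the priority
def pvKey (d : List (String × String)) : String := (List.lookup "priority" d).getD ""

lemma pvKey_recordA (area : String) :
    pvKey (pvRecordA area) = "P" ++ PySem.Int.toStr (pvPrioA area) := by
  simp [pvKey, pvRecordA, pvPrioA, List.lookup]

-- insertBy skips a prefix it is not inserted before
lemma insertBy_skip {α : Type} (before : α → α → Bool) (x : α) (ys zs : List α)
    (h : ∀ y ∈ ys, before x y = false) :
    PySem.List.insertBy before x (ys ++ zs) = ys ++ PySem.List.insertBy before x zs := by
  induction ys with
  | nil => simp
  | cons y ys ih =>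
    simp only [List.cons_append, PySem.List.insertBy, h y (by simp)]
    simp [ih (fun y hy => h y (by simp [hy]))]

-- insertBy prepends when it goes before everything
lemma insertBy_head {α : Type} (before : α → α → Bool) (x : α) (zs : List α)
    (h : ∀ z ∈ zs, before x z = true) :
    PySem.List.insertBy before x zs = x :: zs := by
  cases zs with
  | nil => rfl
  | cons z zs => simp [PySem.List.insertBy, h z (by simp)]

-- the stable sort of a list whose keys are all P1/P2/P3 is the bucket concatenation
lemma sorted_three {α : Type} (key : α → String) (l : List α)
    (h : ∀ x ∈ l, key x = "P1" ∨ key x = "P2" ∨ key x = "P3") :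
    PySem.List.sorted l key =
      l.filter (fun x => key x == "P1") ++ l.filter (fun x => key x == "P2")
        ++ l.filter (fun x => key x == "P3") := by
  induction l using List.reverseRecOn with
  | nil => simp [PySem.List.sorted]
  | append_singleton l x ih =>
    have hl : ∀ y ∈ l, key y = "P1" ∨ key y = "P2" ∨ key y = "P3" :=
      fun y hy => h y (by simp [hy])
    have hx := h x (by simp)
    rw [PySem.List.sorted_eq_foldl_insertBy, List.foldl_append, ← PySem.List.sorted_eq_foldl_insertBy,
      ih hl]
    simp only [List.foldl_cons, List.foldl_nil, List.filter_append]
    have hmem1 : ∀ y ∈ l.filter (fun x => key x == "P1"), key y = "P1" := by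
      intro y hy; simpa using (List.of_mem_filter hy)
    have hmem2 : ∀ y ∈ l.filter (fun x => key x == "P2"), key y = "P2" := by
      intro y hy; simpa using (List.of_mem_filter hy)
    have hmem3 : ∀ y ∈ l.filter (fun x => key x == "P3"), key y = "P3" := by
      intro y hy; simpa using (List.of_mem_filter hy)
    rcases hx with hx | hx | hx
    · -- x goes right after the P1 block (stability)
      rw [List.append_assoc,
        insertBy_skip _ x _ _ (fun y hy => by
          simp only [hmem1 y hy, hx]; simp; try decide),
        insertBy_head _ x _ (fun z hz => by
          rcases List.mem_append.1 hz with hz | hz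
          · simp only [hmem2 z hz, hx]; simp; try decide
          · simp only [hmem3 z hz, hx]; simp; try decide)]
      simp [hx]
    · -- x goes right after the P2 block
      rw [List.append_assoc,
        insertBy_skip _ x _ _ (fun y hy => by
          simp only [hmem1 y hy, hx]; simp; try decide),
        insertBy_skip _ x _ _ (fun y hy => by
          simp only [hmem2 y hy, hx]; simp; try decide),
        insertBy_head _ x _ (fun z hz => by
          simp only [hmem3 z hz, hx]; simp; try decide)]
      simp [hx]
    · -- x goes at the very end
      rw [PySem.List.insertBy_of_forall_not_before _ x _ (fun y hy => by
        simp only [List.append_assoc, List.mem_append] at hy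
        rcases hy with hy | hy | hy
        · simp only [hmem1 y hy, hx]; simp; try decide
        · simp only [hmem2 y hy, hx]; simp; try decide
        · simp only [hmem3 y hy, hx]; simp; try decide)]
      simp [hx]

-- A's loop body is an append-map
lemma foldl_append_map (l : List String) :
    l.foldl (fun acc a => acc ++ [pvRecordA a]) [] = l.map pvRecordA := by
  have : ∀ acc, l.foldl (fun acc a => acc ++ [pvRecordA a]) acc = acc ++ l.map pvRecordA := by
    induction l with
    | nil => simp
    | cons a l ih => intro acc; simp [ih]
  simpa using this []

lemma pvP1 : ("P" ++ PySem.Int.toStr 1) = "P1" := by decide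
lemma pvP2 : ("P" ++ PySem.Int.toStr 2) = "P2" := by decide
lemma pvP3 : ("P" ++ PySem.Int.toStr 3) = "P3" := by decide

-- B's fold computes the three buckets of A's records
lemma foldB (l : List String) (b1 b2 b3 : List (List (String × String))) :
    l.foldl pvStepB (b1, b2, b3) =
      (b1 ++ (l.map pvRecordA).filter (fun d => pvKey d == "P1"),
       b2 ++ (l.map pvRecordA).filter (fun d => pvKey d == "P2"),
       b3 ++ (l.map pvRecordA).filter (fun d => pvKey d == "P3")) := by
  induction l generalizing b1 b2 b3 with
  | nil => simp
  | cons a l ih =>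
    have hrec : pvStepB (b1, b2, b3) a =
        (if pvPrioA a = 1 then (b1 ++ [pvRecordA a], b2, b3)
         else if pvPrioA a = 2 then (b1, b2 ++ [pvRecordA a], b3)
         else (b1, b2, b3 ++ [pvRecordA a])) := by
      simp only [pvStepB, pvPrio_eq]
      have : [("area", a), ("priority", "P" ++ PySem.Int.toStr (pvPrioA a)),
          ("focus", "Improve " ++ PySem.Str.lower a)] = pvRecordA a := by
        simp [pvRecordA, pvPrioA]
      rw [this]
    have hkey : pvKey (pvRecordA a) = "P" ++ PySem.Int.toStr (pvPrioA a) := pvKey_recordA a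
    rcases pvPrio_cases a with hp | hp | hp <;>
      simp [List.foldl_cons, hrec, hp, ih, hkey, pvP1, pvP2, pvP3]

lemma pv_main (l : List String) :
    PySem.List.sorted (l.foldl (fun acc a => acc ++ [pvRecordA a]) [])
        (fun d => (List.lookup "priority" d).getD "") =
      (l.foldl pvStepB ([], [], [])).1 ++ (l.foldl pvStepB ([], [], [])).2.1
        ++ (l.foldl pvStepB ([], [], [])).2.2 := by
  rw [foldl_append_map, foldB]
  have hk : ∀ d ∈ l.map pvRecordA,
      pvKey d = "P1" ∨ pvKey d = "P2" ∨ pvKey d = "P3" := by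
    intro d hd
    rcases List.mem_map.1 hd with ⟨a, _, rfl⟩
    rw [pvKey_recordA]
    rcases pvPrio_cases a with hp | hp | hp <;> simp [hp, pvP1, pvP2, pvP3]
  have := sorted_three pvKey (l.map pvRecordA) hk
  simp only [pvKey] at this ⊢
  rw [show PySem.List.sorted (l.map pvRecordA) (fun d => (List.lookup "priority" d).getD "") =
      PySem.List.sorted (l.map pvRecordA) pvKey from rfl, this]
  simp

-- ===== VERDICT (by name: the statement is the Claim_ definition above) =====
theorem prioritize_improvements_py_spec : Claim_equal_prioritize_improvements_py := by
  intro weak_areas _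
  unfold Spec_prioritize_improvements_py prioritize_improvements_py prioritize_improvements_py_alt
  exact pv_main _
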